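-- pv_equiv track=rewrite | github.com/NgoHai0804/Project3 | a.py | check_patterns_in_line
-- ===== SOURCE A (Python) =====
-- from typing import List, Dict, Tuple, Optional, Any
--
-- def check_patterns_in_line(line: List[Any], mark: str) -> int:
--     pattern = "".join("X" if c == mark else "_" if c is None else "O" for c in line)
--     prio = 0
--     if "XXXX" in pattern:
--         prio += 10000
--     if "_XXX_" in pattern:
--         prio += 5000
--     if "XX_X" in pattern:
--         prio += 3000
--     if "XXX_X" in pattern:
--         prio += 8000
--     if "_XXXX" in pattern:
--         prio += 10000
--     if "XXXX_" in pattern: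
--         prio += 10000
--     return prio
-- ===== SOURCE B (Python) =====
-- def check_patterns_in_line(line, mark):
--     pats = [("XXXX", 10000), ("_XXX_", 5000), ("XX_X", 3000),
--             ("XXX_X", 8000), ("_XXXX", 10000), ("XXXX_", 10000)]
--     flags = [False] * len(pats)
--     window = ""
--     for c in line:
--         ch = 'X' if c == mark else '_' if c is None else 'O'
--         window = (window + ch)[-5:]
--         flags = [fl or window.endswith(p) for fl, (p, _) in zip(flags, pats)]
--     return sum(s for fl, (_, s) in zip(flags, pats) if fl)
-- ===== Notes on version B (the rewrite author's own statement) =====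
-- stated objective: alternative
-- what changed: B never builds the mapped pattern string and never runs substring searches: it makes one streaming pass over the raw line, mapping each cell on the fly, sliding a window of the last 5 mapped characters, and OR-ing six per-pattern presence flags (window.endswith) at each step; at the end it sums the scores of the set flags.
import Mathlib
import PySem

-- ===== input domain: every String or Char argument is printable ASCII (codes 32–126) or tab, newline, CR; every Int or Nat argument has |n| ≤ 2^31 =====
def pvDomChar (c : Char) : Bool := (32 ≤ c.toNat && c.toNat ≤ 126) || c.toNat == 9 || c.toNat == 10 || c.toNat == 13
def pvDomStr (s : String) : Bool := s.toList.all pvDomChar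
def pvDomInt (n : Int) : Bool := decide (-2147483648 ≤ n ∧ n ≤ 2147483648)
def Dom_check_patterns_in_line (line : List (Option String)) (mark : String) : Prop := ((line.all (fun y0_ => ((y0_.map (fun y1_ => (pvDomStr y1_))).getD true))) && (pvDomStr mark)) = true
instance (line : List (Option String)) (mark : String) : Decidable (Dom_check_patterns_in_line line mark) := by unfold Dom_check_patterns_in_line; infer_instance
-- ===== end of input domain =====

-- B replaces A's build-the-mapped-string-then-six-substring-searches by one streaming pass over
-- the raw line with O(1) extra state (a window of the last 5 mapped chars plus six presence
-- flags); objective: alternative (same asymptotic cost, different traversal/decomposition).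


-- ===== PORT A =====
def check_patterns_in_line (line : List (Option String)) (mark : String) : Int :=
  let pattern := PySem.Str.join "" (line.map (fun c =>
    if c == some mark then "X" else if c == none then "_" else "O"))
  let prio : Int := 0
  let prio := if PySem.Str.isIn "XXXX" pattern then prio + 10000 else prio
  let prio := if PySem.Str.isIn "_XXX_" pattern then prio + 5000 else prio
  let prio := if PySem.Str.isIn "XX_X" pattern then prio + 3000 else prio
  let prio := if PySem.Str.isIn "XXX_X" pattern then prio + 8000 else prio
  let prio := if PySem.Str.isIn "_XXXX" pattern then prio + 10000 else prio
  let prio := if PySem.Str.isIn "XXXX_" pattern then prio + 10000 else prio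
  prio

-- ===== PORT B =====
-- Source B's pats table
def pvPats : List (List Char × Int) :=
  [("XXXX".toList, 10000), ("_XXX_".toList, 5000), ("XX_X".toList, 3000),
   ("XXX_X".toList, 8000), ("_XXXX".toList, 10000), ("XXXX_".toList, 10000)]

-- Source B's loop body: map the cell, slide the 5-char window ((window+ch)[-5:]),
-- OR each flag with window.endswith(p)
def pvStep (mark : String) (st : List Char × List Bool) (c : Option String) :
    List Char × List Bool :=
  let ch := if c == some mark then 'X' else if c == none then '_' else 'O'
  let window := PySem.List.slice (st.1 ++ [ch]) (some (-5)) none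
  (window, List.zipWith (fun fl p => fl || PySem.Chars.endswith window p.1) st.2 pvPats)

def check_patterns_in_line_alt (line : List (Option String)) (mark : String) : Int :=
  let st := line.foldl (pvStep mark) ([], pvPats.map (fun _ => false))
  (st.2.zip pvPats).foldl (fun acc x => if x.1 then acc + x.2.2 else acc) 0

-- ===== PRECONDITION & SPEC =====
def Spec_check_patterns_in_line (line : List (Option String)) (mark : String) (out : Int) : Prop := out = check_patterns_in_line_alt line mark
instance (line : List (Option String)) (mark : String) (out : Int) : Decidable (Spec_check_patterns_in_line line mark out) := by unfold Spec_check_patterns_in_line; infer_instance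

-- ===== CLAIM (what is proved, stated in full; the proofs are below) =====
def Claim_equal_check_patterns_in_line : Prop := ∀ (line : List (Option String)) (mark : String), Dom_check_patterns_in_line line mark → Spec_check_patterns_in_line line mark (check_patterns_in_line line mark)

-- ===== LEMMAS AND PROOFS =====

def pvCell (mark : String) (c : Option String) : Char :=
  if c == some mark then 'X' else if c == none then '_' else 'O'

-- A's pattern string, as a char list, is the cell map of the line.
theorem pvPattern_toList (line : List (Option String)) (mark : String) :
    (PySem.Str.join "" (line.map (fun c =>
      if c == some mark then "X" else if c == none then "_" else "O"))).toList
      = line.map (pvCell mark) := by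
  rw [PySem.Str.toList_join]
  have h : (line.map (fun c => if c == some mark then "X" else if c == none then "_" else "O")).map String.toList
      = (line.map (pvCell mark)).map (fun c => [c]) := by
    simp only [List.map_map]
    refine List.map_congr_left (fun c _ => ?_)
    simp only [Function.comp, pvCell]
    split_ifs <;> rfl
  rw [h]
  exact PySem.Chars.join_nil_singletons _

-- a suffix of length ≤ 5 of W is a suffix of W's last-5 window, and conversely
theorem pv_suffix_drop_iff (p W : List Char) (hp : p.length ≤ 5) :
    p <:+ W.drop (W.length - 5) ↔ p <:+ W := by
  constructor
  · exact fun h => h.trans (List.drop_suffix _ _)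
  · rintro ⟨u, hu⟩
    rcases Nat.le_total W.length 5 with h5 | h5
    · rw [Nat.sub_eq_zero_of_le h5]; simpa using ⟨u, hu⟩
    · rw [← hu]
      have hle : (u ++ p).length - 5 ≤ u.length := by rw [List.length_append]; omega
      rw [List.drop_append_of_le_length hle]
      exact List.suffix_append _ _

-- an infix of t++[c] is either an infix of t or a suffix of t++[c]
theorem pv_infix_concat (p t : List Char) (c : Char) :
    p <:+: (t ++ [c]) ↔ p <:+: t ∨ p <:+ (t ++ [c]) := by
  constructor
  · rintro ⟨u, v, huv⟩
    rcases List.eq_nil_or_concat v with rfl | ⟨v', d, rfl⟩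
    · right; exact ⟨u, by simpa using huv⟩
    · left
      have h : (u ++ p ++ v') ++ [d] = t ++ [c] := by simpa using huv
      exact ⟨u, v', List.append_inj_left' h rfl⟩
  · rintro (⟨u, v, huv⟩ | ⟨u, hu⟩)
    · exact ⟨u, v ++ [c], by rw [← huv]; simp⟩
    · exact ⟨u, [], by simp [hu]⟩

-- one step of Source B's flag update is exact: occurrence in t++[c] = old occurrence OR the
-- new window ends with the pattern
theorem pv_flag_step (p t : List Char) (c : Char) (_hp : p ≠ []) (h5 : p.length ≤ 5) :
    (PySem.Chars.isIn p t
      || PySem.Chars.endswith ((t ++ [c]).drop ((t ++ [c]).length - 5)) p)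
      = PySem.Chars.isIn p (t ++ [c]) := by
  have hw : PySem.Chars.endswith ((t ++ [c]).drop ((t ++ [c]).length - 5)) p
      = PySem.Chars.endswith (t ++ [c]) p := by
    rw [Bool.eq_iff_iff, PySem.Chars.endswith_iff, PySem.Chars.endswith_iff]
    exact pv_suffix_drop_iff p (t ++ [c]) h5
  rw [hw, Bool.eq_iff_iff]
  simp only [Bool.or_eq_true, PySem.Chars.endswith_iff]
  constructor
  · rintro (h | h)
    · exact (PySem.Chars.isIn_iff_infix _ _).mpr
        ((pv_infix_concat p t c).mpr (Or.inl ((PySem.Chars.isIn_iff_infix _ _).mp h)))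
    · exact (PySem.Chars.isIn_iff_infix _ _).mpr ((pv_infix_concat p t c).mpr (Or.inr h))
  · intro h
    rcases (pv_infix_concat p t c).mp ((PySem.Chars.isIn_iff_infix _ _).mp h) with h | h
    · exact Or.inl ((PySem.Chars.isIn_iff_infix _ _).mpr h)
    · exact Or.inr h

-- zipWith over a mapped copy of the same list is a map
theorem pv_zipWith_map {α β : Type} (g : β → α → β) (f : α → β) (l : List α) :
    List.zipWith g (l.map f) l = l.map (fun p => g (f p) p) := by
  induction l with
  | nil => rfl
  | cons a l ih => simp [ih]

-- the window slide is exact: (window + ch)[-5:] of the last-5 window of t is the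
-- last-5 window of t ++ [ch]
theorem pv_window (t : List Char) (ch : Char) :
    PySem.List.slice (t.drop (t.length - 5) ++ [ch]) (some (-5)) none
      = (t ++ [ch]).drop ((t ++ [ch]).length - 5) := by
  rw [PySem.List.slice_from_neg_ofNat _ 5 (by omega)]
  rcases Nat.lt_or_ge t.length 5 with h4 | h4
  · rw [Nat.sub_eq_zero_of_le (by omega : t.length ≤ 5), List.drop_zero]
  · have hlen : (t.drop (t.length - 5)).length = 5 := by simp; omega
    have h1 : (t.drop (t.length - 5) ++ [ch]).length - 5 = 1 := by
      rw [List.length_append, hlen]; rfl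
    have h2 : (t ++ [ch]).length - 5 = t.length - 4 := by simp
    rw [h1, h2,
        List.drop_append_of_le_length (by omega : 1 ≤ (t.drop (t.length - 5)).length),
        List.drop_append_of_le_length (by omega : t.length - 4 ≤ t.length),
        List.drop_drop]
    congr 2
    omega

-- each of Source B's six patterns is nonempty and at most 5 chars long
theorem pv_pats_ok (p : List Char × Int) (hp : p ∈ pvPats) : p.1 ≠ [] ∧ p.1.length ≤ 5 := by
  simp only [pvPats, List.mem_cons, List.not_mem_nil, or_false] at hp
  rcases hp with rfl | rfl | rfl | rfl | rfl | rfl <;> exact ⟨by decide, by decide⟩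

-- main invariant: folding Source B's step over `line` from the state describing a processed
-- mapped prefix t yields the state describing t ++ (mapped line)
theorem pv_fold_invariant (mark : String) (line : List (Option String)) (t : List Char) :
    line.foldl (pvStep mark)
      (t.drop (t.length - 5), pvPats.map (fun p => PySem.Chars.isIn p.1 t))
      = ((t ++ line.map (pvCell mark)).drop ((t ++ line.map (pvCell mark)).length - 5),
         pvPats.map (fun p => PySem.Chars.isIn p.1 (t ++ line.map (pvCell mark)))) := by
  induction line generalizing t with
  | nil => simp
  | cons c line ih =>
    have hstep : pvStep mark
        (t.drop (t.length - 5), pvPats.map (fun p => PySem.Chars.isIn p.1 t)) c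
        = ((t ++ [pvCell mark c]).drop ((t ++ [pvCell mark c]).length - 5),
           pvPats.map (fun p => PySem.Chars.isIn p.1 (t ++ [pvCell mark c]))) := by
      simp only [pvStep]
      rw [(rfl : (if c == some mark then 'X' else if c == none then '_' else 'O')
                  = pvCell mark c)]
      rw [pv_window]
      simp only [Prod.mk.injEq]
      refine ⟨rfl, ?_⟩
      rw [pv_zipWith_map]
      refine List.map_congr_left (fun p hp => ?_)
      exact pv_flag_step p.1 t (pvCell mark c) (pv_pats_ok p hp).1 (pv_pats_ok p hp).2
    rw [List.foldl_cons, hstep, ih (t ++ [pvCell mark c])]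
    simp

-- ===== VERDICT (by name: the statement is the Claim_ definition above) =====
theorem check_patterns_in_line_spec : Claim_equal_check_patterns_in_line := by
  intro line mark _
  unfold Spec_check_patterns_in_line check_patterns_in_line check_patterns_in_line_alt
  have hinit : (pvPats.map (fun _ => false) : List Bool)
      = pvPats.map (fun p => PySem.Chars.isIn p.1 ([] : List Char)) := by
    refine List.map_congr_left (fun p hp => ?_)
    rw [Eq.comm, PySem.Chars.isIn_eq_false_iff]
    intro h
    exact (pv_pats_ok p hp).1 (List.infix_nil.mp h)
  have h0 : (([] : List Char), pvPats.map (fun _ => false))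
      = ((([] : List Char)).drop (([] : List Char).length - 5),
         pvPats.map (fun p => PySem.Chars.isIn p.1 ([] : List Char))) := by
    rw [hinit]; rfl
  simp only [h0, pv_fold_invariant mark line ([] : List Char), List.nil_append]
  simp only [PySem.Str.isIn_eq, pvPattern_toList, pvPats, List.map_cons, List.map_nil,
    List.zip_cons_cons, List.zip_nil_right, List.foldl_cons, List.foldl_nil]
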